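-- pv_equiv track=rewrite | github.com/dahorak/usmqe-carbon-mock-data-generator | usmqe_cmdg/carbon_client.py | filter_metrics_list
-- ===== SOURCE A (Python) =====
-- def filter_metrics_list(metrics_list, filters):
--     """
--     Filter metrics list based on filters:
--     * filters:  space separated list of filtered strings,
--                 exclamation mark before word means negative filter
--     """
--     if isinstance(filters, str):
--         filters = filters.split()
--     for _filter in filters:
--         if _filter[0] == '!':
--             # process negative filter
--             _filter = _filter[1:]
--             _filtered_metrics = [metric for metric in metrics_list if _filter not in metric]
--         else:
--             # process positive filter
--             _filtered_metrics = [metric for metric in metrics_list if _filter in metric]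
--         metrics_list = _filtered_metrics
--
--     # filter "archive" metrics
--     _filtered_metrics = [metric for metric in metrics_list if ".archive." not in metric]
--     metrics_list = _filtered_metrics
--     return metrics_list
-- ===== SOURCE B (Python) =====
-- def filter_metrics_list(metrics_list, filters):
--     """Classify filters once into positive/negative lists, then keep each
--     metric in one pass over metrics_list."""
--     if isinstance(filters, str):
--         filters = filters.split()
--     positives = []
--     negatives = []
--     for f in filters:
--         if f[0] == '!':
--             negatives.append(f[1:])
--         else:
--             positives.append(f)
--     negatives.append(".archive.")
--     return [m for m in metrics_list
--             if all(p in m for p in positives)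
--             and all(n not in m for n in negatives)]
-- ===== Notes on version B (the rewrite author's own statement) =====
-- stated objective: simpler
-- what changed: Replaces the F sequential filtering passes (one intermediate list per filter) with a single partition of the filters into positive/negative substring lists followed by one pass over metrics_list.
import Mathlib
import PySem

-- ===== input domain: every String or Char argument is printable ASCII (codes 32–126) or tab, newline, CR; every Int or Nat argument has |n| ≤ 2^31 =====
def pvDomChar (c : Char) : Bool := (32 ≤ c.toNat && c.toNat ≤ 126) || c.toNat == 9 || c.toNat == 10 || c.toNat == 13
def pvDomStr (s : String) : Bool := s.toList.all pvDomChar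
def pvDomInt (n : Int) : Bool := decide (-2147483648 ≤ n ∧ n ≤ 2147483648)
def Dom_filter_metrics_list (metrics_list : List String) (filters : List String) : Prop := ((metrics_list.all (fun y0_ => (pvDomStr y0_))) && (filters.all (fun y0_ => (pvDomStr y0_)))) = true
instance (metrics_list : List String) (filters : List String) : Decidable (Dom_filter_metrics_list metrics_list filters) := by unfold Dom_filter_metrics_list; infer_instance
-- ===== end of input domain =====

-- B replaces A's sequential per-filter passes by one partition of the filters plus a single pass over metrics_list (objective: simpler).
-- ===== PORT A =====
def filter_metrics_list (metrics_list : List String) (filters : List String) : List String :=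
  let ml := filters.foldl (fun ml f =>
    if PySem.Str.pyGet? f 0 = some '!' then
      ml.filter (fun m => !(PySem.Str.isIn (PySem.Str.slice f (some 1) none) m))
    else
      ml.filter (fun m => PySem.Str.isIn f m)) metrics_list
  ml.filter (fun m => !(PySem.Str.isIn ".archive." m))

-- ===== PORT B =====
def filter_metrics_list_alt (metrics_list : List String) (filters : List String) : List String :=
  let pn := filters.foldl (fun (pn : List String × List String) f =>
    if PySem.Str.pyGet? f 0 = some '!' then (pn.1, pn.2 ++ [PySem.Str.slice f (some 1) none])
    else (pn.1 ++ [f], pn.2)) ([], [])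
  let negatives := pn.2 ++ [".archive."]
  metrics_list.filter (fun m =>
    pn.1.all (fun p => PySem.Str.isIn p m) && negatives.all (fun n => !(PySem.Str.isIn n m)))

-- ===== PRECONDITION & SPEC =====
-- Pre_ excludes an empty-string filter token, on which A (and B) raise IndexError at _filter[0].
def Pre_filter_metrics_list (metrics_list : List String) (filters : List String) : Prop :=
  "" ∉ filters
instance (metrics_list : List String) (filters : List String) : Decidable (Pre_filter_metrics_list metrics_list filters) := by unfold Pre_filter_metrics_list; infer_instance
def pvWitness_filter_metrics_list : List String × List String :=
  (["a.b.c", "a.archive.c", "x.y"], ["a", "!y"])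
def Spec_filter_metrics_list (metrics_list : List String) (filters : List String) (out : List String) : Prop := out = filter_metrics_list_alt metrics_list filters
instance (metrics_list : List String) (filters : List String) (out : List String) : Decidable (Spec_filter_metrics_list metrics_list filters out) := by unfold Spec_filter_metrics_list; infer_instance

-- ===== CLAIM (what is proved, stated in full; the proofs are below) =====
def Claim_equal_filter_metrics_list : Prop := ∀ (metrics_list : List String) (filters : List String), Dom_filter_metrics_list metrics_list filters → Pre_filter_metrics_list metrics_list filters → Spec_filter_metrics_list metrics_list filters (filter_metrics_list metrics_list filters)

-- ===== LEMMAS AND PROOFS =====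

def matchesF (f m : String) : Bool :=
  if PySem.Str.pyGet? f 0 = some '!' then !(PySem.Str.isIn (PySem.Str.slice f (some 1) none) m)
  else PySem.Str.isIn f m

def posOf : List String → List String
  | [] => []
  | f :: t => if PySem.Str.pyGet? f 0 = some '!' then posOf t else f :: posOf t

def negOf : List String → List String
  | [] => []
  | f :: t => if PySem.Str.pyGet? f 0 = some '!' then PySem.Str.slice f (some 1) none :: negOf t else negOf t

theorem a_fold (fs : List String) (ml : List String) :
    fs.foldl (fun ml f =>
      if PySem.Str.pyGet? f 0 = some '!' then
        ml.filter (fun m => !(PySem.Str.isIn (PySem.Str.slice f (some 1) none) m))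
      else
        ml.filter (fun m => PySem.Str.isIn f m)) ml
    = ml.filter (fun m => fs.all (fun f => matchesF f m)) := by
  induction fs generalizing ml with
  | nil => simp
  | cons f t ih =>
    simp only [List.foldl_cons, List.all_cons]
    simp only [matchesF] at ih ⊢
    simp at ih
    by_cases h : PySem.List.pyGet? f.toList 0 = some '!'
    · simp [h, ih, List.filter_filter, Bool.and_comm]
    · simp [h, ih, List.filter_filter, Bool.and_comm]

theorem b_fold (fs : List String) (p0 n0 : List String) :
    fs.foldl (fun (pn : List String × List String) f =>
      if PySem.Str.pyGet? f 0 = some '!' then (pn.1, pn.2 ++ [PySem.Str.slice f (some 1) none])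
      else (pn.1 ++ [f], pn.2)) (p0, n0)
    = (p0 ++ posOf fs, n0 ++ negOf fs) := by
  induction fs generalizing p0 n0 with
  | nil => simp [posOf, negOf]
  | cons f t ih =>
    simp at ih
    by_cases h : PySem.List.pyGet? f.toList 0 = some '!'
    · simp [h, posOf, negOf, ih]
    · simp [h, posOf, negOf, ih]

theorem all_split (fs : List String) (m : String) :
    fs.all (fun f => matchesF f m)
    = ((posOf fs).all (fun p => PySem.Str.isIn p m)
        && (negOf fs).all (fun n => !(PySem.Str.isIn n m))) := by
  induction fs with
  | nil => simp [posOf, negOf]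
  | cons f t ih =>
    simp only [matchesF] at ih ⊢
    simp at ih
    by_cases h : PySem.List.pyGet? f.toList 0 = some '!'
    · simp [h, posOf, negOf, ih, Bool.and_assoc, Bool.and_comm, Bool.and_left_comm]
    · simp [h, posOf, negOf, ih, Bool.and_assoc]

-- ===== VERDICT (by name: the statement is the Claim_ definition above) =====
theorem filter_metrics_list_spec : Claim_equal_filter_metrics_list := by
  intro ml fs _ _
  unfold Spec_filter_metrics_list filter_metrics_list filter_metrics_list_alt
  rw [a_fold, b_fold]
  simp only [List.nil_append, List.filter_filter]
  apply List.filter_congr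
  intro m _
  simp [all_split, Bool.and_assoc, Bool.and_comm, Bool.and_left_comm]
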